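-- pv_equiv track=rewrite | github.com/MartianDreamer/Algo2023 | random/1829.py | getMaximumXor
-- ===== SOURCE A (Python) =====
-- from typing import List
--
-- def getMaximumXor(nums: List[int], maximumBit: int) -> List[int]:
--     max_val = 2**maximumBit - 1
--     nums_val = nums[0]
--     for n in nums[1:]:
--         nums_val ^= n
--     rs = [max_val ^ nums_val]
--     for n in nums[len(nums) - 1:0:-1]:
--         nums_val ^= n
--         rs.append(nums_val ^ max_val)
--     return rs
-- ===== SOURCE B (Python) =====
-- from typing import List
--
-- def getMaximumXor(nums: List[int], maximumBit: int) -> List[int]: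
--     mask = (1 << maximumBit) - 1
--     def solve(carry, xs):
--         # answers for all non-empty prefixes of xs (longest prefix first),
--         # with carry = XOR of everything to the left of xs
--         if not xs:
--             return []
--         if len(xs) == 1:
--             return [carry ^ xs[0] ^ mask]
--         mid = len(xs) // 2
--         left, right = xs[:mid], xs[mid:]
--         lx = 0
--         for v in left:
--             lx ^= v
--         return solve(carry ^ lx, right) + solve(carry, left)
--     return solve(0, nums)
-- ===== Notes on version B (the rewrite author's own statement) =====
-- stated objective: alternative
-- what changed: B computes the answers by divide and conquer: it splits the list in halves, XORs the left half into a carry, recursively solves the right half (longest prefixes) then the left half, and concatenates, instead of A's two linear loops that fold the total XOR and then undo it element by element from the end.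
import Mathlib
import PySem

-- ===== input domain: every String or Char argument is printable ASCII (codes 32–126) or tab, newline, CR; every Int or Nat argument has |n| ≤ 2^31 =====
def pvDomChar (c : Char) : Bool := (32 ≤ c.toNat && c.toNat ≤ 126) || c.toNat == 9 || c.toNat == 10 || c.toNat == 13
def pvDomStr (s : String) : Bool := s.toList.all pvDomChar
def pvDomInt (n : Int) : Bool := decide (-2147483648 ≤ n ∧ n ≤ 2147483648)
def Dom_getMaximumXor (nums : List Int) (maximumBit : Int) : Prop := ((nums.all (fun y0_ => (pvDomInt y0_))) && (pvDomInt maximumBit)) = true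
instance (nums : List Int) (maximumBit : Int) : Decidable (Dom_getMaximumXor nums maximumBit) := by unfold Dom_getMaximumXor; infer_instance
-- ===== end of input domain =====

-- One honest line: B replaces A's linear backward unwind of a running XOR by a
-- divide-and-conquer recursion on list halves carrying the left XOR (objective:
-- alternative); return values proved equal on Pre_.

-- ===== PORT A =====
-- A, literally: fold the whole XOR forward, then walk nums[len(nums)-1:0:-1]
-- (that slice is exactly the reversed tail) undoing one element per step.
def getMaximumXor (nums : List Int) (maximumBit : Int) : List Int :=
  let max_val : Int := 2 ^ maximumBit.toNat - 1          -- 2**maximumBit - 1; Pre_ has 0 ≤ maximumBit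
  let nums_val : Int := (PySem.List.pyGet? nums 0).getD 0  -- nums[0]; Pre_ excludes []
  let nums_val : Int := (nums.drop 1).foldl (fun v n => PySem.Int.bxor v n) nums_val
  let rs : List Int := [PySem.Int.bxor max_val nums_val]
  let st := ((nums.drop 1).reverse).foldl
      (fun (st : Int × List Int) n =>
        (PySem.Int.bxor st.1 n, st.2 ++ [PySem.Int.bxor (PySem.Int.bxor st.1 n) max_val]))
      (nums_val, rs)
  st.2

-- ===== PORT B =====
-- B's recursive helper `solve(carry, xs)`: answers for all non-empty prefixes
-- of xs, longest first, with carry = XOR of everything left of xs.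
-- xs[:mid]/xs[mid:] with 0 ≤ mid ≤ len are exactly take/drop.
def pvSolveB (mask carry : Int) (xs : List Int) : List Int :=
  if _h0 : xs = [] then []
  else if _h1 : xs.length = 1 then
    [PySem.Int.bxor (PySem.Int.bxor carry ((PySem.List.pyGet? xs 0).getD 0)) mask]
  else
    let mid : Nat := xs.length / 2                       -- len(xs)//2, nonnegative
    let left := xs.take mid
    let right := xs.drop mid
    let lx := left.foldl (fun a v => PySem.Int.bxor a v) 0
    pvSolveB mask (PySem.Int.bxor carry lx) right ++ pvSolveB mask carry left
termination_by xs.length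
decreasing_by
  · have : xs.length ≥ 2 := by
      rcases xs with _ | ⟨a, _ | ⟨b, t⟩⟩ <;> simp_all
    simp; omega
  · have : xs.length ≥ 2 := by
      rcases xs with _ | ⟨a, _ | ⟨b, t⟩⟩ <;> simp_all
    simp; omega

def getMaximumXor_alt (nums : List Int) (maximumBit : Int) : List Int :=
  let mask : Int := 2 ^ maximumBit.toNat - 1             -- (1 << maximumBit) - 1; Pre_ has 0 ≤ maximumBit
  pvSolveB mask 0 nums

-- ===== PRECONDITION & SPEC =====
-- Python A raises IndexError on nums = [] (at nums[0]) and TypeError when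
-- maximumBit < 0 (2**maximumBit is then a float, and float ^ int fails);
-- exactly those raising inputs are excluded.
def Pre_getMaximumXor (nums : List Int) (maximumBit : Int) : Prop :=
  nums ≠ [] ∧ 0 ≤ maximumBit
instance (nums : List Int) (maximumBit : Int) : Decidable (Pre_getMaximumXor nums maximumBit) := by
  unfold Pre_getMaximumXor; infer_instance
def pvWitness_getMaximumXor : List Int × Int := ([3, 1, 2], 2)

def Spec_getMaximumXor (nums : List Int) (maximumBit : Int) (out : List Int) : Prop := out = getMaximumXor_alt nums maximumBit
instance (nums : List Int) (maximumBit : Int) (out : List Int) : Decidable (Spec_getMaximumXor nums maximumBit out) := by unfold Spec_getMaximumXor; infer_instance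

-- ===== CLAIM (what is proved, stated in full; the proofs are below) =====
def Claim_equal_getMaximumXor : Prop := ∀ (nums : List Int) (maximumBit : Int), Dom_getMaximumXor nums maximumBit → Pre_getMaximumXor nums maximumBit → Spec_getMaximumXor nums maximumBit (getMaximumXor nums maximumBit)

-- ===== LEMMAS AND PROOFS =====

theorem pv_bxor_eq_xor (a b : Int) : PySem.Int.bxor a b = Int.xor a b := by
  rcases a with m | m <;> rcases b with n | n <;>
    simp [PySem.Int.bxor, Int.xor, Int.negSucc_eq] <;> omega

theorem pv_xor_assoc (a b c : Int) :
    Int.xor (Int.xor a b) c = Int.xor a (Int.xor b c) := by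
  rcases a with m | m <;> rcases b with n | n <;> rcases c with k | k <;>
    simp [Int.xor, Nat.xor_assoc]

theorem pv_bxor_assoc (a b c : Int) :
    PySem.Int.bxor (PySem.Int.bxor a b) c = PySem.Int.bxor a (PySem.Int.bxor b c) := by
  simp [pv_bxor_eq_xor, pv_xor_assoc]

theorem pv_zero_bxor (a : Int) : PySem.Int.bxor 0 a = a := by
  rw [PySem.Int.bxor_comm]; exact PySem.Int.bxor_zero a

-- prefix-XOR list with carry c
def pvPfx (c : Int) : List Int → List Int
  | [] => []
  | x :: xs => PySem.Int.bxor c x :: pvPfx (PySem.Int.bxor c x) xs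

theorem pv_foldl_shift (l : List Int) : ∀ c d : Int,
    PySem.Int.bxor c (l.foldl (fun a v => PySem.Int.bxor a v) d)
      = l.foldl (fun a v => PySem.Int.bxor a v) (PySem.Int.bxor c d) := by
  induction l with
  | nil => intro c d; rfl
  | cons x l ih =>
    intro c d
    simp only [List.foldl_cons]
    rw [ih, pv_bxor_assoc]

theorem pvPfx_append (l r : List Int) : ∀ c : Int,
    pvPfx c (l ++ r) = pvPfx c l ++ pvPfx (l.foldl (fun a v => PySem.Int.bxor a v) c) r := by
  induction l with
  | nil => intro c; rfl
  | cons x l ih =>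
    intro c
    simp only [List.cons_append, pvPfx, List.foldl_cons]
    rw [ih]

theorem pvSolveB_eq (mask carry : Int) (xs : List Int) : xs ≠ [] →
    pvSolveB mask carry xs = (pvPfx carry xs).reverse.map (fun p => PySem.Int.bxor p mask) := by
  induction carry, xs using pvSolveB.induct with
  | case1 carry => intro h; exact absurd rfl h
  | case2 carry xs h0 h1 =>
    intro _
    rcases xs with _ | ⟨x, _ | _⟩ <;> simp_all
    rw [pvSolveB]
    simp [pvPfx, PySem.List.pyGet?, PySem.List.pyIdx?]
  | case3 carry xs h0 h1 mid left right lx ih1 ih2 =>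
    intro _
    have hlen : xs.length ≥ 2 := by
      rcases xs with _ | ⟨a, _ | ⟨b, t⟩⟩ <;> simp_all
    have hmid : mid = xs.length / 2 := rfl
    have hL : left = xs.take mid := rfl
    have hR : right = xs.drop mid := rfl
    have hlx : lx = left.foldl (fun a v => PySem.Int.bxor a v) 0 := rfl
    have hleft : left ≠ [] := by
      have h' : left.length = mid := by rw [hL]; simp [hmid]; omega
      intro h; rw [h] at h'; simp at h'; omega
    have hright : right ≠ [] := by
      have h' : right.length = xs.length - mid := by rw [hR]; simp
      intro h; rw [h] at h'; simp at h'; omega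
    rw [pvSolveB, dif_neg h0, dif_neg h1]
    show pvSolveB mask (PySem.Int.bxor carry lx) right ++ pvSolveB mask carry left = _
    rw [ih1 hright, ih2 hleft]
    have hsplit := pvPfx_append left right carry
    rw [show left ++ right = xs by rw [hL, hR]; exact List.take_append_drop mid xs] at hsplit
    have hcarry : left.foldl (fun a v => PySem.Int.bxor a v) carry = PySem.Int.bxor carry lx := by
      rw [hlx, pv_foldl_shift, PySem.Int.bxor_zero]
    rw [hsplit, hcarry]
    simp [List.reverse_append]

-- ===== A-side characterisation (A's two loops equal the reversed prefix map) =====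

theorem pv_bxor_cancel (a b : Int) : PySem.Int.bxor (PySem.Int.bxor a b) b = a := by
  rw [pv_bxor_assoc]
  rw [show PySem.Int.bxor b b = 0 from PySem.Int.bxor_self b, PySem.Int.bxor_zero]

def pvALoop (m : Int) (st : Int × List Int) (l : List Int) : Int × List Int :=
  l.foldl (fun st n =>
    (PySem.Int.bxor st.1 n, st.2 ++ [PySem.Int.bxor (PySem.Int.bxor st.1 n) m])) st

theorem pvALoop_snd_cons (m c v : Int) (rs l : List Int) :
    (pvALoop m (v, c :: rs) l).2 = c :: (pvALoop m (v, rs) l).2 := by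
  induction l generalizing v rs with
  | nil => rfl
  | cons n l ih =>
    simpa [pvALoop, List.foldl_cons] using
      ih (PySem.Int.bxor v n) (rs ++ [PySem.Int.bxor (PySem.Int.bxor v n) m])

theorem pvPfx_concat (c n : Int) (t : List Int) :
    pvPfx c (t ++ [n])
      = pvPfx c t ++ [PySem.Int.bxor (t.foldl (fun a v => PySem.Int.bxor a v) c) n] := by
  rw [pvPfx_append]; rfl

theorem pvMainA (m h : Int) (t : List Int) :
    (pvALoop m (t.foldl (fun v n => PySem.Int.bxor v n) h,
        [PySem.Int.bxor m (t.foldl (fun v n => PySem.Int.bxor v n) h)]) t.reverse).2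
      = (pvPfx 0 (h :: t)).reverse.map (fun x => PySem.Int.bxor m x) := by
  induction t using List.reverseRecOn with
  | nil => simp [pvALoop, pvPfx, PySem.Int.bxor_comm]
  | append_singleton t n ih =>
    have hV : (t ++ [n]).foldl (fun v n => PySem.Int.bxor v n) h
        = PySem.Int.bxor (t.foldl (fun v n => PySem.Int.bxor v n) h) n := by
      simp
    have hpfx : pvPfx 0 (h :: (t ++ [n]))
        = pvPfx 0 (h :: t) ++ [PySem.Int.bxor (t.foldl (fun a v => PySem.Int.bxor a v) h) n] := by
      rw [show h :: (t ++ [n]) = (h :: t) ++ [n] by simp, pvPfx_concat]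
      simp [pv_zero_bxor]
    rw [hpfx]
    simp only [List.reverse_append, List.reverse_cons, List.reverse_nil, List.nil_append,
      List.cons_append, List.map_cons, hV]
    rw [show (pvALoop m (PySem.Int.bxor (t.foldl (fun v n => PySem.Int.bxor v n) h) n,
          [PySem.Int.bxor m (PySem.Int.bxor (t.foldl (fun v n => PySem.Int.bxor v n) h) n)])
          (n :: t.reverse))
        = pvALoop m
            (PySem.Int.bxor (PySem.Int.bxor (t.foldl (fun v n => PySem.Int.bxor v n) h) n) n,
             [PySem.Int.bxor m (PySem.Int.bxor (t.foldl (fun v n => PySem.Int.bxor v n) h) n)] ++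
               [PySem.Int.bxor
                 (PySem.Int.bxor (PySem.Int.bxor (t.foldl (fun v n => PySem.Int.bxor v n) h) n) n)
                 m]) t.reverse from rfl]
    rw [pv_bxor_cancel]
    rw [List.singleton_append, pvALoop_snd_cons]
    rw [PySem.Int.bxor_comm (t.foldl (fun v n => PySem.Int.bxor v n) h) m]
    rw [ih]

-- ===== VERDICT (by name: the statements are the Claim_ definitions above) =====
theorem getMaximumXor_spec : Claim_equal_getMaximumXor := by
  intro nums maximumBit _ hpre
  show getMaximumXor nums maximumBit = getMaximumXor_alt nums maximumBit
  rcases nums with _ | ⟨h, t⟩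
  · exact absurd rfl hpre.1
  · show (pvALoop (2 ^ maximumBit.toNat - 1) (_, _) _).2 = _
    rw [show (PySem.List.pyGet? (h :: t) 0).getD 0 = h by
          simp [PySem.List.pyGet?, PySem.List.pyIdx?],
        show (h :: t).drop 1 = t from rfl]
    rw [pvMainA (2 ^ maximumBit.toNat - 1) h t]
    rw [show getMaximumXor_alt (h :: t) maximumBit
          = pvSolveB (2 ^ maximumBit.toNat - 1) 0 (h :: t) from rfl]
    rw [pvSolveB_eq (2 ^ maximumBit.toNat - 1) 0 (h :: t) (by simp)]
    simp [PySem.Int.bxor_comm]
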